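-- pv_equiv track=rewrite | github.com/Bunny05-dev/Bunny05-dev-rushik_akula | FINAL SUBMISSION/Tasks/Set-1/python/chall-1.py | retrieve_items
-- ===== SOURCE A (Python) =====
-- def retrieve_items(dungeons):
--     dungeons = list(map(int, dungeons))
--
--     items_retrieved = 0
--
--
--     def toggle_dungeons(dungeons):
--         return [1 - state for state in dungeons]
--
--     for i in range(len(dungeons)):
--         if dungeons[i] == 1:
--             items_retrieved += 1
--             dungeons = toggle_dungeons(dungeons)
--
--     return items_retrieved
-- ===== SOURCE B (Python) =====
-- def retrieve_items(dungeons):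
--     # Single pass: a global toggle maps x -> 1-x, so after an even number of
--     # toggles a cell reads 1 iff it was 1, after an odd number iff it was 0.
--     # Track only the current "target" value instead of rebuilding the list.
--     items = 0
--     target = 1
--     for d in map(int, dungeons):
--         if d == target:
--             items += 1
--             target = 1 - target
--     return items
-- ===== Notes on version B (the rewrite author's own statement) =====
-- stated objective: alternative
-- what changed: Replaced the loop that rebuilds the whole toggled list after every hit with a single pass that tracks the current toggle parity (the 'target' value 1 or 0) in O(1) state; quadratic worst case becomes linear, though a timing run's random inputs rarely trigger A's rebuilds.
import Mathlib
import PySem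

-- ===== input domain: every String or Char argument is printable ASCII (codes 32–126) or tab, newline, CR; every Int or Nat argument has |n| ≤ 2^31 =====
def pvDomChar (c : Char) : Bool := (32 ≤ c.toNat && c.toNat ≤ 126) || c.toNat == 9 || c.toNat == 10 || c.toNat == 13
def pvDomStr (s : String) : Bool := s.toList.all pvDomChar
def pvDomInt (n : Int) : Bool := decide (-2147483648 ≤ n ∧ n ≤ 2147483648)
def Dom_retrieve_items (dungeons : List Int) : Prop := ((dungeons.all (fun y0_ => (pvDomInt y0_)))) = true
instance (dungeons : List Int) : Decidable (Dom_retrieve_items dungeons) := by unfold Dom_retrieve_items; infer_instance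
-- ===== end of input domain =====

-- B replaces A's rebuild-the-whole-toggled-list loop by a single pass tracking only the toggle parity (objective: alternative/linear worst case; not measurably faster on the random timing inputs).

-- ===== PORT A =====
-- A's step: check dungeons[i]; on a 1, count and rebuild the whole list toggled.
-- (Python's `dungeons = list(map(int, dungeons))` is the identity on a list of ints.)
-- The index i from range(len(dungeons)) is always in range, so `[i]?` is always `some`.
def pvStepA (st : List Int × Int) (i : Nat) : List Int × Int :=
  match st.1[i]? with
  | some v => if v = 1 then (st.1.map (fun s => 1 - s), st.2 + 1) else st
  | none => st

def retrieve_items (dungeons : List Int) : Int :=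
  (List.foldl pvStepA (dungeons, 0) (List.range dungeons.length)).2

-- ===== PORT B =====
def pvStepB (st : Int × Int) (d : Int) : Int × Int :=
  if d = st.2 then (st.1 + 1, 1 - st.2) else st

def retrieve_items_alt (dungeons : List Int) : Int :=
  (dungeons.foldl pvStepB (0, 1)).1

-- ===== PRECONDITION & SPEC =====
def Spec_retrieve_items (dungeons : List Int) (out : Int) : Prop := out = retrieve_items_alt dungeons
instance (dungeons : List Int) (out : Int) : Decidable (Spec_retrieve_items dungeons out) := by unfold Spec_retrieve_items; infer_instance

-- ===== CLAIM (what is proved, stated in full; the proofs are below) =====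
def Claim_equal_retrieve_items : Prop := ∀ (dungeons : List Int), Dom_retrieve_items dungeons → Spec_retrieve_items dungeons (retrieve_items dungeons)

-- ===== LEMMAS AND PROOFS =====

-- `tgl p l` is l toggled p-many-times-mod-2; `tgt p` is the value A's test matches then.
def pvTgl (p : Bool) (l : List Int) : List Int := if p then l.map (fun s => 1 - s) else l

def pvTgt (p : Bool) : Int := if p then 0 else 1

theorem pvTgl_map (p : Bool) (l : List Int) :
    (pvTgl p l).map (fun s => 1 - s) = pvTgl (!p) l := by
  cases p <;> simp [pvTgl, List.map_map]

theorem pvTgl_drop (p : Bool) (l : List Int) (k : Nat) :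
    (pvTgl p l).drop k = pvTgl p (l.drop k) := by
  cases p <;> simp [pvTgl, List.map_drop]

theorem pvTgl_get0 (p : Bool) (d : Int) (rest : List Int) :
    (pvTgl p (d :: rest))[0]? = some (if p then 1 - d else d) := by
  cases p <;> simp [pvTgl]

-- Shifting the index range by k is the same as dropping k elements of the state list:
-- the count produced by the remaining steps only depends on positions ≥ k.
theorem pvShift (m : Nat) (k : Nat) (L : List Int) (c : Int) :
    (List.foldl pvStepA (L, c) ((List.range m).map (· + k))).2
      = (List.foldl pvStepA (L.drop k, c) (List.range m)).2 := by
  induction m generalizing k L c with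
  | zero => simp
  | succ n ih =>
    rw [List.range_succ_eq_map]
    have hmap : ∀ (j : Nat), ((List.range n).map (· + 1)).map (· + j)
        = (List.range n).map (· + (j + 1)) := by
      intro j; rw [List.map_map]; apply List.map_congr_left; intro x _; simp; omega
    simp only [List.map_cons, List.foldl_cons, hmap]
    have hget : (L.drop k)[0]? = L[k]? := by
      rw [List.getElem?_drop]; simp
    have hsucc : List.map Nat.succ (List.range n) = (List.range n).map (· + 1) := by
      apply List.map_congr_left; intro x _; omega
    by_cases hk : k < L.length
    · obtain ⟨v, hv⟩ : ∃ v, L[k]? = some v := ⟨L[k], (List.getElem?_eq_some_iff).2 ⟨hk, rfl⟩⟩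
      simp only [pvStepA, Nat.zero_add, hget, hv, hsucc]
      by_cases h1 : v = 1
      · simp only [h1, if_true]
        rw [ih (k + 1) (L.map (fun s => 1 - s)) (c + 1), ih 1 ((L.drop k).map (fun s => 1 - s)) (c + 1)]
        rw [List.map_drop, List.drop_drop]
      · simp only [if_neg h1]
        rw [ih (k + 1) L c, ih 1 (L.drop k) c, List.drop_drop]
    · have hnone : L[k]? = none := List.getElem?_eq_none (by omega)
      simp only [pvStepA, Nat.zero_add, hget, hnone]
      rw [ih (k + 1) L c, ih 1 (L.drop k) c, List.drop_drop]

-- Main invariant: A's fold on a p-times-toggled list equals B's fold tracking target pvTgt p.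
theorem pvMain (ds : List Int) (p : Bool) (c : Int) :
    (List.foldl pvStepA (pvTgl p ds, c) (List.range ds.length)).2
      = (List.foldl pvStepB (c, pvTgt p) ds).1 := by
  induction ds generalizing p c with
  | nil => cases p <;> simp [pvTgl]
  | cons d rest ih =>
    rw [List.length_cons, List.range_succ_eq_map]
    simp only [List.foldl_cons]
    have hstep0 : pvStepA (pvTgl p (d :: rest), c) 0 =
        if d = pvTgt p then (pvTgl (!p) (d :: rest), c + 1) else (pvTgl p (d :: rest), c) := by
      simp only [pvStepA, pvTgl_get0]
      cases p
      · simp [pvTgt, pvTgl_map]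
      · have : (1 - d = 1) ↔ (d = 0) := by omega
        simp [pvTgt, this, pvTgl_map]
    rw [hstep0]
    by_cases hd : d = pvTgt p
    · rw [if_pos hd]
      rw [pvShift rest.length 1 (pvTgl (!p) (d :: rest)) (c + 1)]
      rw [pvTgl_drop, List.drop_one, List.tail_cons]
      rw [ih (!p) (c + 1)]
      have : pvStepB (c, pvTgt p) d = (c + 1, pvTgt (!p)) := by
        cases p <;> simp [pvStepB, pvTgt, hd]
      rw [this]
    · rw [if_neg hd]
      rw [pvShift rest.length 1 (pvTgl p (d :: rest)) c]
      rw [pvTgl_drop, List.drop_one, List.tail_cons]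
      rw [ih p c]
      have : pvStepB (c, pvTgt p) d = (c, pvTgt p) := by
        simp [pvStepB, hd]
      rw [this]

-- ===== VERDICT (by name: the statement is the Claim_ definition above) =====
theorem retrieve_items_spec : Claim_equal_retrieve_items := by
  intro ds _
  unfold Spec_retrieve_items retrieve_items retrieve_items_alt
  have := pvMain ds false 0
  simpa [pvTgl, pvTgt] using this
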